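-- pv_equiv track=rewrite | github.com/shikharvashistha/consiciousness-centric-cognition | agi/engines/creative_engine.py | _extract_analogical_structures
-- ===== SOURCE A (Python) =====
-- from typing import Dict, List, Tuple, Optional, Any, Set
--
-- def _extract_analogical_structures(concepts: List[str]) -> Dict[str, List[str]]:
--     """Extract analogical structures between concepts"""
--     try:
--         analogical_structures = {}
--
--         # Group concepts by structural patterns
--         for concept in concepts:
--             # Extract structural features
--             if 'network' in concept.lower() or 'system' in concept.lower():
--                 if 'structural_systems' not in analogical_structures:
--                     analogical_structures['structural_systems'] = []
--                 analogical_structures['structural_systems'].append(concept)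
--
--             if 'process' in concept.lower() or 'algorithm' in concept.lower():
--                 if 'processes' not in analogical_structures:
--                     analogical_structures['processes'] = []
--                 analogical_structures['processes'].append(concept)
--
--             if 'theory' in concept.lower() or 'principle' in concept.lower():
--                 if 'theoretical_concepts' not in analogical_structures:
--                     analogical_structures['theoretical_concepts'] = []
--                 analogical_structures['theoretical_concepts'].append(concept)
--
--         return analogical_structures
--
--     except Exception:
--         return {}
-- ===== SOURCE B (Python) =====
-- # Two-stage, table-driven grouping: classify once per concept via a keyword
-- # table, fix the category order by first appearance, then collect each
-- # category's members with one scan per category.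
--
-- KEYWORDS = {
--     'structural_systems': ('network', 'system'),
--     'processes': ('process', 'algorithm'),
--     'theoretical_concepts': ('theory', 'principle'),
-- }
--
-- def _categories_of(concept):
--     low = concept.lower()
--     return [name for name, kws in KEYWORDS.items() if any(k in low for k in kws)]
--
-- def _extract_analogical_structures(concepts):
--     order = []
--     for concept in concepts:
--         for name in _categories_of(concept):
--             if name not in order:
--                 order.append(name)
--     return {name: [c for c in concepts if name in _categories_of(c)]
--             for name in order}
-- ===== Notes on version B (the rewrite author's own statement) =====
-- stated objective: alternative
-- what changed: Replaces the single pass with inline keyword branches mutating a dict by a table-driven classifier used in two stages: one pass fixes the category order by first appearance, then each category's member list is built by its own scan over the concepts.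
import Mathlib
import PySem

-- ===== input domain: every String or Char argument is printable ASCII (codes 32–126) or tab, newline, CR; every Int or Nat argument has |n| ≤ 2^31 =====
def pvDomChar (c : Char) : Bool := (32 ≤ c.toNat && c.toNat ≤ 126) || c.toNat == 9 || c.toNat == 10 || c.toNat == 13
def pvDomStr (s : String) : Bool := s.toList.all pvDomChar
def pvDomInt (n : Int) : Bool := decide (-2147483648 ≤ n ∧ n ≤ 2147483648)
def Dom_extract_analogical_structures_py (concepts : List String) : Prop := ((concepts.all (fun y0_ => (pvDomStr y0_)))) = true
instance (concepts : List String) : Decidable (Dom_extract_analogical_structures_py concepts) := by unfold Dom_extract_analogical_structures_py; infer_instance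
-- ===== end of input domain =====

-- B groups via a keyword table in two stages (first-appearance category order, then one
-- scan per category); same return value as A (alternative decomposition, no speed claim).
-- A's try/except is dead (no statement in the body can raise), so no Pre_ is needed.

-- ===== PORT A =====
-- `if key not in d: d[key] = []` then `d[key].append(concept)`
def pvAAdd (d : PySem.Dict String (List String)) (key : String) (concept : String) :
    PySem.Dict String (List String) :=
  (if d.contains key then d else d.insert key []).modify key [] (fun v => v ++ [concept])

-- one iteration of A's `for concept in concepts` loop (branches in A's order)
def pvAStep (d : PySem.Dict String (List String)) (concept : String) :
    PySem.Dict String (List String) :=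
  let low := PySem.Str.lower concept
  let d1 := if PySem.Str.isIn "network" low || PySem.Str.isIn "system" low then
      pvAAdd d "structural_systems" concept else d
  let d2 := if PySem.Str.isIn "process" low || PySem.Str.isIn "algorithm" low then
      pvAAdd d1 "processes" concept else d1
  if PySem.Str.isIn "theory" low || PySem.Str.isIn "principle" low then
      pvAAdd d2 "theoretical_concepts" concept else d2

def extract_analogical_structures_py (concepts : List String) : List (String × List String) :=
  (concepts.foldl pvAStep PySem.Dict.empty).items

-- ===== PORT B =====
-- the KEYWORDS table of Source B (a dict iterated in insertion order = this list)
def pvTable : List (String × List String) :=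
  [("structural_systems", ["network", "system"]),
   ("processes", ["process", "algorithm"]),
   ("theoretical_concepts", ["theory", "principle"])]

-- `_categories_of`: [name for name, kws in KEYWORDS.items() if any(k in low for k in kws)]
def pvCatsOf (concept : String) : List String :=
  let low := PySem.Str.lower concept
  (pvTable.filter (fun p => p.2.any (fun k => PySem.Str.isIn k low))).map Prod.fst

-- inner loop of stage 1: `if name not in order: order.append(name)`
def pvOrderStep (order : List String) (concept : String) : List String :=
  (pvCatsOf concept).foldl (fun o name => if name ∈ o then o else o ++ [name]) order

def extract_analogical_structures_py_alt (concepts : List String) : List (String × List String) :=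
  let order := concepts.foldl pvOrderStep []
  order.map (fun name => (name, concepts.filter (fun c => name ∈ pvCatsOf c)))

-- ===== PRECONDITION & SPEC =====
def Spec_extract_analogical_structures_py (concepts : List String) (out : List (String × List String)) : Prop := out = extract_analogical_structures_py_alt concepts
instance (concepts : List String) (out : List (String × List String)) : Decidable (Spec_extract_analogical_structures_py concepts out) := by unfold Spec_extract_analogical_structures_py; infer_instance

-- ===== CLAIM (what is proved, stated in full; the proofs are below) =====
def Claim_equal_extract_analogical_structures_py : Prop := ∀ (concepts : List String), Dom_extract_analogical_structures_py concepts → Spec_extract_analogical_structures_py concepts (extract_analogical_structures_py concepts)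

-- ===== LEMMAS AND PROOFS =====

-- value stored under the first occurrence of key k (empty if absent)
def pvGetV (L : List (String × List String)) (k : String) : List String :=
  ((L.find? (fun p => p.1 == k)).map (fun p => p.2)).getD []

-- A's dict update `d[k].append(c)` (with default []) expressed on the items list
def pvItemsAdd (L : List (String × List String)) (k c : String) : List (String × List String) :=
  if L.any (fun p => p.1 == k) then
    L.map (fun p => if p.1 = k then (p.1, p.2 ++ [c]) else p)
  else L ++ [(k, [c])]

theorem pvGetV_eq_of_mem (D : List (String × List String))
    (hnd : (D.map Prod.fst).Nodup) (p : String × List String) (hp : p ∈ D) :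
    pvGetV D p.1 = p.2 := by
  induction D with
  | nil => cases hp
  | cons q D ih =>
    simp only [List.map_cons, List.nodup_cons] at hnd
    rcases List.mem_cons.mp hp with h | h
    · subst h; simp [pvGetV]
    · have hne : (q.1 == p.1) = false := by
        simp; intro e; exact hnd.1 (e ▸ List.mem_map_of_mem h)
      simp only [pvGetV, List.find?_cons, hne] at *
      exact ih hnd.2 h

-- A's items after one `pvAAdd`, computed on the raw items list
theorem pvAAdd_items (d : PySem.Dict String (List String)) (hnd : d.keys.Nodup) (k c : String) :
    (pvAAdd d k c).items = pvItemsAdd d.items k c := by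
  have hndD : (d.items.map Prod.fst).Nodup := hnd
  by_cases hc : d.items.any (fun p => p.1 == k)
  · have hcc : d.contains k = true := hc
    unfold pvAAdd pvItemsAdd
    rw [if_pos hcc, if_pos hc]
    show (d.insert k (d.getD k [] ++ [c])).items = _
    rw [PySem.Dict.items_insert_of_contains d _ hcc]
    refine List.map_congr_left (fun p hp => ?_)
    by_cases hk : p.1 = k
    · have hv : pvGetV d.items k = p.2 := hk ▸ pvGetV_eq_of_mem d.items hndD p hp
      have : d.getD k [] = pvGetV d.items k := rfl
      simp [hk, this, hv]
    · simp [hk]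
  · have hcc : d.contains k = false := by
      cases h : d.contains k
      · rfl
      · exact absurd h hc
    unfold pvAAdd pvItemsAdd
    rw [if_neg (by simp [hcc]), if_neg hc]
    show ((d.insert k []).insert k ((d.insert k []).getD k [] ++ [c])).items = _
    rw [PySem.Dict.insert_insert_self, PySem.Dict.getD_insert_self]
    rw [PySem.Dict.items_insert_of_not_contains d _ hcc]
    simp

theorem pvAAdd_nodup (d : PySem.Dict String (List String)) (hnd : d.keys.Nodup) (k c : String) :
    (pvAAdd d k c).keys.Nodup := by
  unfold pvAAdd
  split <;> exact PySem.Dict.nodup_keys_insert _ _ _ (by first | exact hnd | exact PySem.Dict.nodup_keys_insert _ _ _ hnd)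

theorem pvCond_nodup (d : PySem.Dict String (List String)) (hnd : d.keys.Nodup)
    (k c : String) (m : Bool) :
    (if m then pvAAdd d k c else d).keys.Nodup := by
  cases m with
  | false => exact hnd
  | true => simpa using pvAAdd_nodup d hnd k c

theorem pvCondAdd_items (d : PySem.Dict String (List String)) (hnd : d.keys.Nodup)
    (k c : String) (m : Bool) :
    (if m then pvAAdd d k c else d).items = if m then pvItemsAdd d.items k c else d.items := by
  cases m with
  | false => rfl
  | true => simpa using pvAAdd_items d hnd k c

-- pvCatsOf as three independent conditional singletons (table order)
theorem pvCatsOf_eq (c : String) :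
    pvCatsOf c =
      (if PySem.Str.isIn "network" (PySem.Str.lower c) || PySem.Str.isIn "system" (PySem.Str.lower c)
        then ["structural_systems"] else []) ++
      (if PySem.Str.isIn "process" (PySem.Str.lower c) || PySem.Str.isIn "algorithm" (PySem.Str.lower c)
        then ["processes"] else []) ++
      (if PySem.Str.isIn "theory" (PySem.Str.lower c) || PySem.Str.isIn "principle" (PySem.Str.lower c)
        then ["theoretical_concepts"] else []) := by
  unfold pvCatsOf pvTable
  simp only [List.filter_cons, List.filter_nil, List.any_cons, List.any_nil, Bool.or_false]
  split_ifs <;> simp_all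

theorem pvCatsOf_nodup (c : String) : (pvCatsOf c).Nodup := by
  rw [pvCatsOf_eq]
  split_ifs <;> simp_all

-- A's loop body = fold of pvItemsAdd over the category list of the concept
theorem pvAStep_items (d : PySem.Dict String (List String)) (hnd : d.keys.Nodup) (c : String) :
    (pvAStep d c).items = (pvCatsOf c).foldl (fun L k => pvItemsAdd L k c) d.items := by
  rw [pvCatsOf_eq]
  unfold pvAStep
  rw [List.foldl_append, List.foldl_append]
  have h1 := pvCondAdd_items d hnd "structural_systems" c
  have hnd1 := pvCond_nodup d hnd "structural_systems" c
  have hone : ∀ (b : Bool) (L : List (String × List String)) (k : String),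
      (if b then [k] else []).foldl (fun L k => pvItemsAdd L k c) L
        = if b then pvItemsAdd L k c else L := by
    intro b L k; cases b <;> simp
  rw [hone, hone, hone]
  set b1 := PySem.Str.isIn "network" (PySem.Str.lower c) || PySem.Str.isIn "system" (PySem.Str.lower c)
  set b2 := PySem.Str.isIn "process" (PySem.Str.lower c) || PySem.Str.isIn "algorithm" (PySem.Str.lower c)
  set b3 := PySem.Str.isIn "theory" (PySem.Str.lower c) || PySem.Str.isIn "principle" (PySem.Str.lower c)
  rw [pvCondAdd_items _ (pvCond_nodup _ (pvCond_nodup d hnd _ c b1) _ c b2) _ c b3,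
      pvCondAdd_items _ (pvCond_nodup d hnd _ c b1) _ c b2,
      pvCondAdd_items d hnd _ c b1]

theorem pvStep_nodup (d : PySem.Dict String (List String)) (hnd : d.keys.Nodup) (c : String) :
    (pvAStep d c).keys.Nodup := by
  unfold pvAStep
  exact pvCond_nodup _ (pvCond_nodup _ (pvCond_nodup _ hnd _ _ _) _ _ _) _ _ _

theorem pvFold_nodup (xs : List String) :
    ((xs.foldl pvAStep PySem.Dict.empty).keys).Nodup := by
  induction xs using List.reverseRecOn with
  | nil => simp [PySem.Dict.empty]
  | append_singleton xs c ih => rw [List.foldl_append]; exact pvStep_nodup _ ih c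

-- membership in the dedup-append fold
theorem pvMem_dedupFold (cats : List String) :
    ∀ (s : List String) (n : String),
      n ∈ cats.foldl (fun o m => if m ∈ o then o else o ++ [m]) s ↔ n ∈ s ∨ n ∈ cats := by
  induction cats with
  | nil => simp
  | cons k cats ih =>
    intro s n
    rw [List.foldl_cons]
    by_cases hk : k ∈ s
    · rw [if_pos hk, ih]
      simp only [List.mem_cons]
      constructor
      · rintro (h | h)
        · exact Or.inl h
        · exact Or.inr (Or.inr h)
      · rintro (h | rfl | h)
        · exact Or.inl h
        · exact Or.inl hk
        · exact Or.inr h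
    · rw [if_neg hk, ih]
      simp only [List.mem_append, List.mem_cons]
      tauto

theorem pvNodup_dedupFold (cats : List String) :
    ∀ (s : List String), s.Nodup → (cats.foldl (fun o m => if m ∈ o then o else o ++ [m]) s).Nodup := by
  induction cats with
  | nil => intro s hs; exact hs
  | cons k cats ih =>
    intro s hs
    rw [List.foldl_cons]
    by_cases hk : k ∈ s
    · rw [if_pos hk]; exact ih s hs
    · rw [if_neg hk]
      refine ih _ ?_
      simp only [List.nodup_append, List.nodup_singleton, true_and]
      refine ⟨hs, ?_⟩
      intro a ha b hb
      rw [List.mem_singleton] at hb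
      subst hb
      exact fun e => hk (e ▸ ha)

theorem pvDedupFold_eq_append (cats : List String) (hc : cats.Nodup) :
    ∀ (s : List String),
      cats.foldl (fun o m => if m ∈ o then o else o ++ [m]) s = s ++ cats.filter (fun n => n ∉ s) := by
  induction cats with
  | nil => intro s; simp
  | cons k cats ih =>
    rcases List.nodup_cons.mp hc with ⟨hkc, hcats⟩
    intro s
    rw [List.foldl_cons, List.filter_cons]
    by_cases hk : k ∈ s
    · rw [if_pos hk, if_neg (by simp [hk]), ih hcats]
    · rw [if_neg hk, if_pos (by simp [hk]), ih hcats]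
      have e2 : cats.filter (fun n => decide (n ∉ s ++ [k])) = cats.filter (fun n => decide (n ∉ s)) := by
        refine List.filter_congr (fun n hn => ?_)
        have hnk : n ≠ k := fun e => hkc (e ▸ hn)
        simp [hnk]
      rw [e2]
      simp

theorem pvOrder_nodup (xs : List String) : (xs.foldl pvOrderStep []).Nodup := by
  have : ∀ s : List String, s.Nodup → (xs.foldl pvOrderStep s).Nodup := by
    induction xs with
    | nil => intro s hs; exact hs
    | cons c xs ih =>
      intro s hs
      exact ih _ (pvNodup_dedupFold _ _ hs)
  exact this [] List.nodup_nil

theorem pvMem_order (xs : List String) (n : String) :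
    n ∈ xs.foldl pvOrderStep [] ↔ ∃ x ∈ xs, n ∈ pvCatsOf x := by
  have key : ∀ s : List String, n ∈ xs.foldl pvOrderStep s ↔ n ∈ s ∨ ∃ x ∈ xs, n ∈ pvCatsOf x := by
    induction xs with
    | nil => simp
    | cons c xs ih =>
      intro s
      rw [List.foldl_cons]
      show n ∈ List.foldl pvOrderStep (pvOrderStep s c) xs ↔ _
      rw [ih, pvOrderStep, pvMem_dedupFold]
      simp only [List.mem_cons]
      constructor
      · rintro ((h | h) | ⟨x, hx, hn⟩)
        · exact Or.inl h
        · exact Or.inr ⟨c, Or.inl rfl, h⟩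
        · exact Or.inr ⟨x, Or.inr hx, hn⟩
      · rintro (h | ⟨x, (rfl | hx), hn⟩)
        · exact Or.inl (Or.inl h)
        · exact Or.inl (Or.inr hn)
        · exact Or.inr ⟨x, hx, hn⟩
  simpa using key []

-- folding pvItemsAdd over a duplicate-free category list, on a duplicate-free items list
theorem pvAddList (c : String) (cats : List String) (hcats : cats.Nodup) :
    ∀ (L : List (String × List String)), (L.map Prod.fst).Nodup →
      cats.foldl (fun L k => pvItemsAdd L k c) L =
        L.map (fun p => (p.1, p.2 ++ if p.1 ∈ cats then [c] else [])) ++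
        (cats.filter (fun n => n ∉ L.map Prod.fst)).map (fun n => (n, [c])) := by
  induction cats with
  | nil => intro L _; simp
  | cons k cats ih =>
    rcases List.nodup_cons.mp hcats with ⟨hkc, hcats'⟩
    intro L hL
    rw [List.foldl_cons]
    by_cases hk : L.any (fun p => p.1 == k)
    · -- key k already present: in-place bump, keys unchanged
      have hkeys : (L.map (fun p => if p.1 = k then (p.1, p.2 ++ [c]) else p)).map Prod.fst
          = L.map Prod.fst := by
        rw [List.map_map]
        exact List.map_congr_left (fun p _ => by by_cases h : p.1 = k <;> simp [h])
      rw [show pvItemsAdd L k c = L.map (fun p => if p.1 = k then (p.1, p.2 ++ [c]) else p) from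
        by rw [pvItemsAdd, if_pos hk]]
      rw [ih hcats' _ (by rw [hkeys]; exact hL)]
      rw [hkeys]
      congr 1
      · rw [List.map_map]
        refine List.map_congr_left (fun p _ => ?_)
        by_cases h : p.1 = k
        · simp [Function.comp, h, hkc]
        · simp [Function.comp, h]
      · rw [List.filter_cons, if_neg (by
          have : k ∈ L.map Prod.fst := by
            rcases List.any_eq_true.mp hk with ⟨p, hp, he⟩
            exact (beq_iff_eq.mp he) ▸ List.mem_map_of_mem hp
          simp [this])]
    · -- key k new: appended at the end
      have hkL : k ∉ L.map Prod.fst := by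
        intro hm
        rcases List.mem_map.mp hm with ⟨p, hp, he⟩
        exact absurd (List.any_eq_true.mpr ⟨p, hp, by simp [he]⟩) hk
      rw [show pvItemsAdd L k c = L ++ [(k, [c])] from by rw [pvItemsAdd, if_neg hk]]
      have hL' : ((L ++ [(k, [c])]).map Prod.fst).Nodup := by
        simp only [List.map_append, List.map_cons, List.map_nil]
        rw [List.nodup_append]
        refine ⟨hL, List.nodup_singleton _, ?_⟩
        intro a ha b hb
        rw [List.mem_singleton] at hb
        subst hb
        exact fun e => hkL (e ▸ ha)
      rw [ih hcats' _ hL']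
      simp only [List.map_append, List.map_cons, List.map_nil]
      have e1 : L.map (fun p => (p.1, p.2 ++ if p.1 ∈ cats then [c] else []))
          = L.map (fun p => (p.1, p.2 ++ if p.1 ∈ k :: cats then [c] else [])) := by
        refine List.map_congr_left (fun p hp => ?_)
        have hpk : p.1 ≠ k := fun e => hkL (e ▸ List.mem_map_of_mem hp)
        simp only [List.mem_cons]
        congr 2
        simp [hpk]
      have e2 : cats.filter (fun n => n ∉ L.map Prod.fst ++ [k])
          = cats.filter (fun n => n ∉ L.map Prod.fst) := by
        refine List.filter_congr (fun n hn => ?_)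
        have hnk : n ≠ k := fun e => hkc (e ▸ hn)
        simp [hnk]
      rw [e2, e1, if_neg hkc, List.filter_cons, if_pos (by simp [hkL])]
      simp [List.append_assoc]

-- B's result described by the spec shape
def pvSpecS (xs : List String) : List (String × List String) :=
  (xs.foldl pvOrderStep []).map (fun n => (n, xs.filter (fun c => n ∈ pvCatsOf c)))

theorem pvSpecS_keys (xs : List String) :
    (pvSpecS xs).map Prod.fst = xs.foldl pvOrderStep [] := by
  simp [pvSpecS, List.map_map, Function.comp_def]

set_option maxHeartbeats 1600000 in
theorem pvSpecS_snoc (xs : List String) (c : String) :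
    pvSpecS (xs ++ [c]) = (pvCatsOf c).foldl (fun L k => pvItemsAdd L k c) (pvSpecS xs) := by
  rw [pvAddList c (pvCatsOf c) (pvCatsOf_nodup c) (pvSpecS xs)
    (by rw [pvSpecS_keys]; exact pvOrder_nodup xs)]
  rw [pvSpecS_keys]
  unfold pvSpecS
  rw [show (xs ++ [c]).foldl pvOrderStep [] = pvOrderStep (xs.foldl pvOrderStep []) c from
    by rw [List.foldl_append]; rfl]
  rw [pvOrderStep, pvDedupFold_eq_append _ (pvCatsOf_nodup c)]
  rw [List.map_append, List.map_map]
  congr 1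
  · refine List.map_congr_left (fun n _ => ?_)
    simp only [Function.comp]
    rw [List.filter_append]
    congr 1
    simp [List.filter_cons]
  · refine List.map_congr_left (fun n hn => ?_)
    rcases List.mem_filter.mp hn with ⟨hnc, hno⟩
    have hno' : n ∉ xs.foldl pvOrderStep [] := by simpa using hno
    have hfil : xs.filter (fun x => n ∈ pvCatsOf x) = [] := by
      rw [List.filter_eq_nil_iff]
      intro x hx hnx
      exact hno' ((pvMem_order xs n).mpr ⟨x, hx, by simpa using hnx⟩)
    rw [List.filter_append, hfil]
    simp [hnc]

theorem pvMain (xs : List String) :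
    (xs.foldl pvAStep PySem.Dict.empty).items = pvSpecS xs := by
  induction xs using List.reverseRecOn with
  | nil => simp [PySem.Dict.empty, pvSpecS]
  | append_singleton xs c ih =>
    rw [List.foldl_append]
    show (pvAStep (xs.foldl pvAStep PySem.Dict.empty) c).items = _
    rw [pvAStep_items _ (pvFold_nodup xs) c, ih, pvSpecS_snoc]

-- ===== VERDICT (by name: the statement is the Claim_ definition above) =====
theorem extract_analogical_structures_py_spec : Claim_equal_extract_analogical_structures_py := by
  intro concepts _
  unfold Spec_extract_analogical_structures_py
  show (concepts.foldl pvAStep PySem.Dict.empty).items = extract_analogical_structures_py_alt concepts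
  rw [pvMain]
  rfl
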